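-- pv_equiv track=rewrite | github.com/EdgarACarneiro/advent-of-code | 2022/day03/part_1.py | get_rucksack_shared_items_value
-- ===== SOURCE A (Python) =====
-- ASCII_LOWERCASE_LETTERS_START_VAL = 96
--
-- ASCII_UPPERCASE_LETTERS_START_VAL = 38
--
-- def get_item_val(item: str):
--     return ord(item) - (
--         ASCII_LOWERCASE_LETTERS_START_VAL
--         if item.islower()
--         else ASCII_UPPERCASE_LETTERS_START_VAL
--     )
--
-- def get_rucksack_shared_items_value(line: str):
--     # Different behaviour if 1st or 2nd compartment
--     middle_point = len(line) // 2
--     hashmap = {}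
--     shared_items_val = 0
--
--     for i in range(len(line)):
--         # 1st compartment - put in hashmap
--         if i < middle_point:
--             # Value marks if item already appeared
--             hashmap[line[i]] = False
--
--         # 2nd compartment verify if any object is in hashmap
--         elif line[i] in hashmap and not hashmap[line[i]]:
--             shared_items_val += get_item_val(line[i])
--             hashmap[line[i]] = True
--
--     return shared_items_val
-- ===== SOURCE B (Python) =====
-- ASCII_LOWERCASE_LETTERS_START_VAL = 96
--
-- ASCII_UPPERCASE_LETTERS_START_VAL = 38
--
--
-- def get_item_val(item: str):
--     return ord(item) - (
--         ASCII_LOWERCASE_LETTERS_START_VAL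
--         if item.islower()
--         else ASCII_UPPERCASE_LETTERS_START_VAL
--     )
--
--
-- def get_rucksack_shared_items_value(line: str):
--     mid = len(line) // 2
--     shared = set(line[:mid]) & set(line[mid:])
--     return sum(get_item_val(c) for c in shared)
-- ===== Notes on version B (the rewrite author's own statement) =====
-- stated objective: idiomatic
-- what changed: Replaces the single interleaved index loop with a mutable dict of seen/counted flags by splitting the line at the midpoint, intersecting the two compartments as sets, and summing the item values of the intersection; the per-character Python loop becomes C-level set construction/intersection.
import Mathlib
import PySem

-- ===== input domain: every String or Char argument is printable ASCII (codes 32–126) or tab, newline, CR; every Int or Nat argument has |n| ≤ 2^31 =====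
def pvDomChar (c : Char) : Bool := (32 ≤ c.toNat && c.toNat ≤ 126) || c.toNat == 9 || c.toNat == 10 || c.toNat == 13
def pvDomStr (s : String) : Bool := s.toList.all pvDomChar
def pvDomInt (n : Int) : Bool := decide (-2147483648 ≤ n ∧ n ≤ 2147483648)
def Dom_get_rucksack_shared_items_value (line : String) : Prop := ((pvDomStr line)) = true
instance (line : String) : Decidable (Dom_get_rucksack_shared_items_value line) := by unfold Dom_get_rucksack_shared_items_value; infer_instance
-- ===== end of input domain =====

-- B replaces A's single interleaved index loop with a dict of seen/counted flags by a
-- set intersection of the two compartments followed by one summation pass (idiomatic, same cost).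

-- ===== PORT A =====
def get_item_val (item : Char) : Int :=
  (item.toNat : Int) - (if PySem.Chars.islower item then 96 else 38)

-- loop body of A's 'for i in range(len(line))': state is (i, hashmap, shared_items_val)
def pvStepA (mid : Nat) (st : Nat × PySem.Dict Char Bool × Int) (c : Char) :
    Nat × PySem.Dict Char Bool × Int :=
  if st.1 < mid then (st.1 + 1, st.2.1.insert c false, st.2.2)
  else if st.2.1.get? c == some false then
    (st.1 + 1, st.2.1.insert c true, st.2.2 + get_item_val c)
  else (st.1 + 1, st.2.1, st.2.2)

def get_rucksack_shared_items_value (line : String) : Int :=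
  let cs := line.toList
  let mid := cs.length / 2      -- len(line) // 2 : Python floor division of a nonnegative length
  (cs.foldl (pvStepA mid) (0, PySem.Dict.empty, 0)).2.2

-- ===== PORT B =====
def get_item_val_alt (item : Char) : Int :=
  (item.toNat : Int) - (if PySem.Chars.islower item then 96 else 38)

def get_rucksack_shared_items_value_alt (line : String) : Int :=
  let cs := line.toList
  let mid := cs.length / 2
  let shared := PySem.Set.inter (PySem.Set.ofList (cs.take mid)) (PySem.Set.ofList (cs.drop mid))
  (shared.map get_item_val_alt).sum

-- ===== PRECONDITION & SPEC =====
def Spec_get_rucksack_shared_items_value (line : String) (out : Int) : Prop := out = get_rucksack_shared_items_value_alt line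
instance (line : String) (out : Int) : Decidable (Spec_get_rucksack_shared_items_value line out) := by unfold Spec_get_rucksack_shared_items_value; infer_instance

-- ===== CLAIM (what is proved, stated in full; the proofs are below) =====
def Claim_equal_get_rucksack_shared_items_value : Prop := ∀ (line : String), Dom_get_rucksack_shared_items_value line → Spec_get_rucksack_shared_items_value line (get_rucksack_shared_items_value line)

-- ===== LEMMAS AND PROOFS =====

-- Phase 1 of A's loop (indices below mid): the dict accumulates 'insert c false', value untouched.
theorem pvPhase1 (mid : Nat) (L : List Char) :
    ∀ (k : Nat) (d : PySem.Dict Char Bool) (s : Int), k + L.length ≤ mid →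
      L.foldl (pvStepA mid) (k, d, s)
        = (k + L.length, L.foldl (fun d c => d.insert c false) d, s) := by
  induction L with
  | nil => intro k d s _; simp
  | cons c L ih =>
      intro k d s h
      simp only [List.foldl_cons, List.length_cons] at *
      have hk : k < mid := by omega
      rw [show pvStepA mid (k, d, s) c = (k + 1, d.insert c false, s) from by
        simp [pvStepA, hk]]
      rw [ih (k + 1) (d.insert c false) s (by omega)]
      simp; omega

-- Content of the dict after phase 1 from the empty dict.
theorem pvPhase1Dict (L : List Char) :
    ∀ (d : PySem.Dict Char Bool) (c : Char),
      (L.foldl (fun d c => d.insert c false) d).get? c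
        = if c ∈ L then some false else d.get? c := by
  induction L with
  | nil => intro d c; simp
  | cons a L ih =>
      intro d c
      simp only [List.foldl_cons]
      rw [ih]
      by_cases hL : c ∈ L
      · simp [hL]
      · by_cases hca : c = a
        · subst hca; simp [hL, PySem.Dict.get?_insert_self]
        · simp [hL, hca, PySem.Dict.get?_insert_of_ne _ _ hca]

-- Phase 2 of A's loop (indices ≥ mid): the value collected is the sum, over the distinct
-- characters of the rest whose entry in the dict is 'false', of their item values.
theorem pvPhase2 (mid : Nat) (R : List Char) :
    ∀ (k : Nat) (d : PySem.Dict Char Bool) (s : Int), mid ≤ k →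
      (R.foldl (pvStepA mid) (k, d, s)).2.2
        = s + ∑ c ∈ R.toFinset.filter (fun c => d.get? c = some false), get_item_val c := by
  induction R with
  | nil => intro k d s _; simp
  | cons c R ih =>
      intro k d s h
      simp only [List.foldl_cons, List.toFinset_cons]
      have hk : ¬ k < mid := by omega
      by_cases hc : d.get? c = some false
      · rw [show pvStepA mid (k, d, s) c = (k + 1, d.insert c true, s + get_item_val c) from by
          simp [pvStepA, hk, hc]]
        rw [ih (k + 1) (d.insert c true) (s + get_item_val c) (by omega)]
        have hfilt : R.toFinset.filter (fun c' => (d.insert c true).get? c' = some false)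
            = (R.toFinset.filter (fun c' => d.get? c' = some false)).erase c := by
          ext x
          by_cases hx : x = c
          · subst hx; simp [PySem.Dict.get?_insert_self]
          · simp [hx, PySem.Dict.get?_insert_of_ne _ _ hx]
        rw [hfilt]
        rw [Finset.filter_insert, if_pos hc]
        have hie : insert c (R.toFinset.filter (fun c' => d.get? c' = some false))
            = insert c ((R.toFinset.filter (fun c' => d.get? c' = some false)).erase c) := by
          ext x; by_cases hx : x = c <;> simp [hx]
        rw [hie, Finset.sum_insert (Finset.notMem_erase _ _)]; ring
      · rw [show pvStepA mid (k, d, s) c = (k + 1, d, s) from by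
          simp [pvStepA, hk, hc]]
        rw [ih (k + 1) d s (by omega)]
        rw [Finset.filter_insert, if_neg hc]

-- B's sum over the set intersection, as a Finset sum.
theorem pvAltSum (L R : List Char) :
    ((PySem.Set.inter (PySem.Set.ofList L) (PySem.Set.ofList R)).map get_item_val_alt).sum
      = ∑ c ∈ R.toFinset.filter (fun c => c ∈ L), get_item_val c := by
  have hnd : (PySem.Set.inter (PySem.Set.ofList L) (PySem.Set.ofList R)).Nodup :=
    PySem.Set.nodup_inter _ _ (PySem.Set.nodup_ofList L)
  have hfin : (PySem.Set.inter (PySem.Set.ofList L) (PySem.Set.ofList R)).toFinset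
      = R.toFinset.filter (fun c => c ∈ L) := by
    ext x
    simp [PySem.Set.mem_inter, PySem.Set.mem_ofList, and_comm]
  calc ((PySem.Set.inter (PySem.Set.ofList L) (PySem.Set.ofList R)).map get_item_val_alt).sum
      = ∑ c ∈ (PySem.Set.inter (PySem.Set.ofList L) (PySem.Set.ofList R)).toFinset,
          get_item_val_alt c := (List.sum_toFinset _ hnd).symm
    _ = ∑ c ∈ R.toFinset.filter (fun c => c ∈ L), get_item_val c := by rw [hfin]; rfl

-- ===== VERDICT (by name: the statement is the Claim_ definition above) =====
theorem get_rucksack_shared_items_value_spec : Claim_equal_get_rucksack_shared_items_value := by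
  intro line _
  unfold Spec_get_rucksack_shared_items_value
  show (line.toList.foldl (pvStepA (line.toList.length / 2)) (0, PySem.Dict.empty, 0)).2.2
    = ((PySem.Set.inter (PySem.Set.ofList (line.toList.take (line.toList.length / 2)))
        (PySem.Set.ofList (line.toList.drop (line.toList.length / 2)))).map get_item_val_alt).sum
  set cs := line.toList with hcs
  set mid := cs.length / 2 with hmid
  have hsplit : cs = cs.take mid ++ cs.drop mid := (List.take_append_drop mid cs).symm
  have hlen : (cs.take mid).length = mid := by
    simp [List.length_take]; omega
  rw [show cs.foldl (pvStepA mid) (0, PySem.Dict.empty, 0)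
        = (cs.take mid ++ cs.drop mid).foldl (pvStepA mid) (0, PySem.Dict.empty, 0) from by
      rw [← hsplit]]
  rw [List.foldl_append]
  rw [pvPhase1 mid (cs.take mid) 0 PySem.Dict.empty 0 (by omega)]
  rw [hlen]
  rw [Nat.zero_add]
  rw [pvPhase2 mid (cs.drop mid) mid _ 0 (le_refl mid)]
  rw [pvAltSum (cs.take mid) (cs.drop mid)]
  have hpred : ∀ c : Char,
      ((cs.take mid).foldl (fun d c => d.insert c false) PySem.Dict.empty).get? c = some false
        ↔ c ∈ cs.take mid := by
    intro c
    rw [pvPhase1Dict]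
    by_cases hc : c ∈ cs.take mid <;> simp [hc]
  have hfc : (cs.drop mid).toFinset.filter
        (fun c => ((cs.take mid).foldl (fun d c => d.insert c false) PySem.Dict.empty).get? c = some false)
      = (cs.drop mid).toFinset.filter (fun c => c ∈ cs.take mid) := by
    apply Finset.filter_congr
    intro c _
    simp [hpred c]
  rw [hfc]
  ring
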